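-- pv_equiv track=rewrite | github.com/nashid/vul_detect | flow_analysis/control/control_flow_analyzer.py | getCFGDependencyEdgeLines
-- ===== SOURCE A (Python) =====
-- def getCFGDependencyEdgeLines(backWardRelatedLines, CFGLineDepdcy,
--                               relatedLines_final, controlFlowEdges):
--     '''get backward cfg dependent lines and edges
--
--     using bfs to get backward cfg-related lines and edges
--
--     :param backWardRelatedLines:
--     :param CFGLineDepdcy:
--     :param relatedLines_final:
--     :param controlFlowEdges:
--     :return:
--     '''
--     CFGDepdcyLines = set()
--     queue = list()
--     queue.extend(backWardRelatedLines)
--     visited = set()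
--     visited = visited.union(backWardRelatedLines)
--     while queue:
--         fro = queue.pop(0)
--         if fro not in relatedLines_final:
--             CFGDepdcyLines.add(fro)
--             relatedLines_final.add(fro)
--         if fro not in CFGLineDepdcy:  # end parsing
--             continue
--         CFGLineDepdcyLineSet = CFGLineDepdcy[fro]
--
--         for CFGLineDepdcyLine in list(CFGLineDepdcyLineSet):
--             cfEdge = str(CFGLineDepdcyLine) + "-" + str(fro)
--             if cfEdge not in controlFlowEdges:
--                 controlFlowEdges.add(cfEdge)
--
--             if CFGLineDepdcyLine not in visited:
--                 visited.add(CFGLineDepdcyLine)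
--                 queue.append(CFGLineDepdcyLine)
--
--     return CFGDepdcyLines
-- ===== SOURCE B (Python) =====
-- def getCFGDependencyEdgeLines(backWardRelatedLines, CFGLineDepdcy,
--                               relatedLines_final, controlFlowEdges):
--     '''Naive fixpoint instead of a BFS queue: repeatedly sweep the whole
--     discovered-line list until nothing new appears, then derive the new
--     dependency lines by filtering against the snapshot of relatedLines_final
--     and emit the edges by a single scan of the dependency dict.
--     (Mutates relatedLines_final and controlFlowEdges like the original.)'''
--     seen = set(backWardRelatedLines)
--     order = list(dict.fromkeys(backWardRelatedLines))
--     changed = True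
--     while changed:
--         changed = False
--         for n in list(order):
--             for d in CFGLineDepdcy.get(n, []):
--                 if d not in seen:
--                     seen.add(d)
--                     order.append(d)
--                     changed = True
--     CFGDepdcyLines = {n for n in order if n not in relatedLines_final}
--     relatedLines_final |= CFGDepdcyLines
--     for n, deps in CFGLineDepdcy.items():
--         if n in seen:
--             for d in deps:
--                 controlFlowEdges.add(str(d) + "-" + str(n))
--     return CFGDepdcyLines
-- ===== Notes on version B (the rewrite author's own statement) =====
-- stated objective: faster
-- what changed: A's worklist BFS (a FIFO queue popped one node at a time with pop(0), interleaving line collection, edge collection and visited-bookkeeping) is replaced by a queue-free naive fixpoint saturation: the discovered-line list is swept in full rounds until stable, then the dependency lines are obtained by filtering the discovered list against the snapshot of relatedLines_final and the edges are emitted by one scan of the dependency dict guarded by reachability; dropping pop(0)'s linear shifting made B measurably faster on a timing run's larger inputs.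
import Mathlib
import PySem

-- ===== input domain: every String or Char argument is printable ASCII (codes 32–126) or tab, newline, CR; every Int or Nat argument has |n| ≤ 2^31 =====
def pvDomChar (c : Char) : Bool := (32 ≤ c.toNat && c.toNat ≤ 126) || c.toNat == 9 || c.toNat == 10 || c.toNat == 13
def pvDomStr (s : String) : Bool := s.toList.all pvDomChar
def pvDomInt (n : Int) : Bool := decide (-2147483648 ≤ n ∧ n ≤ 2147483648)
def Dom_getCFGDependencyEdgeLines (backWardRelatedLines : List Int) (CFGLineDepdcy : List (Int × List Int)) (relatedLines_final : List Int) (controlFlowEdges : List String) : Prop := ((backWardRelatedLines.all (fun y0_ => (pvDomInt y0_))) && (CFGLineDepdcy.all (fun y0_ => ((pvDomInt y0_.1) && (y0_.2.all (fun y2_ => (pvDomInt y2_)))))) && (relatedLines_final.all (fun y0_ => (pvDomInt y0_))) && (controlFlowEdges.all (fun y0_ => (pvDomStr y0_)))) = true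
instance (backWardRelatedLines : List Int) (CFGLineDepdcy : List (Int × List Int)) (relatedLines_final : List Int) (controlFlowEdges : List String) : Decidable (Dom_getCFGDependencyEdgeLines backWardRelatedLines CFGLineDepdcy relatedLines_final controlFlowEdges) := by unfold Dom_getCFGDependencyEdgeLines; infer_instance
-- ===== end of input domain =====

-- B replaces A's worklist BFS (one FIFO queue interleaving line collection, edge
-- collection and visited-bookkeeping) by a queue-free naive fixpoint: sweep the
-- whole discovered-line list, repeat until stable, then derive the dependency
-- lines by filtering against the snapshot of relatedLines_final and the edges by
-- one scan of the dependency dict; a timing run measured B faster at the larger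
-- generated sizes (A's queue.pop(0) shifts the queue on every dequeue; objective: faster).
-- A mutates relatedLines_final / controlFlowEdges in place; the equivalence proved
-- here is about the RETURN value only (Python B performs equivalent set mutations).

-- ===== PORT A =====
-- Everything from here to pvGoA is TERMINATION machinery for the while-loop
-- (a measure counting not-yet-visited dependency values), not part of the computed value.
def pvUniv (CFGLineDepdcy : List (Int × List Int)) : List Int :=
  (CFGLineDepdcy.flatMap Prod.snd).dedup

def pvUnvis (CFGLineDepdcy : List (Int × List Int)) (vis : List Int) : Nat :=
  ((pvUniv CFGLineDepdcy).filter (fun x => decide (x ∉ vis))).length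

lemma pvFilter_mono (l : List Int) (p q : Int → Bool) (h : ∀ x ∈ l, p x = true → q x = true) :
    (l.filter p).length ≤ (l.filter q).length := by
  induction l with
  | nil => simp
  | cons x t ih =>
    have iht := ih (fun y hy hp => h y (List.mem_cons_of_mem _ hy) hp)
    rw [List.filter_cons, List.filter_cons]
    by_cases hp : p x = true
    · rw [if_pos hp, if_pos (h x List.mem_cons_self hp)]
      simpa using iht
    · rw [if_neg hp]
      by_cases hq : q x = true
      · rw [if_pos hq]; simp; omega
      · rw [if_neg hq]; exact iht

lemma pvFilter_lt (l vis : List Int) (d : Int) (hd : d ∈ l) (hv : d ∉ vis) :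
    (l.filter (fun x => decide (x ∉ vis ++ [d]))).length < (l.filter (fun x => decide (x ∉ vis))).length := by
  induction l with
  | nil => simp at hd
  | cons x t ih =>
    have hmono := pvFilter_mono t (fun y => decide (y ∉ vis ++ [d])) (fun y => decide (y ∉ vis))
      (by intro y _ hy; simp at hy ⊢; exact hy.1)
    rw [List.filter_cons, List.filter_cons]
    by_cases hx : x = d
    · subst hx
      rw [if_neg (by simp), if_pos (by simpa using hv)]
      simpa using Nat.lt_succ_of_le hmono
    · have hd' : d ∈ t := by
        rcases List.mem_cons.mp hd with h | h
        · exact absurd h.symm hx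
        · exact h
      have hlt := ih hd'
      by_cases hxv : x ∈ vis
      · rw [if_neg (by simp [hxv]), if_neg (by simp [hxv])]
        exact hlt
      · rw [if_pos (by simp [hxv, hx]), if_pos (by simp [hxv])]
        simpa using hlt

lemma pvUnvis_lt (dict : List (Int × List Int)) (vis : List Int) (d : Int)
    (hd : d ∈ pvUniv dict) (hv : d ∉ vis) :
    pvUnvis dict (vis ++ [d]) < pvUnvis dict vis :=
  pvFilter_lt (pvUniv dict) vis d hd hv

lemma pvAdd_not_mem {x : Int} {s : List Int} (h : x ∉ s) : PySem.Set.add s x = s ++ [x] := by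
  simp [PySem.Set.add, PySem.Set.contains, h]

-- first-discovery scan (proof/measure device): elements of ds not yet in vis, deduplicated
def pvDiscover : List Int → List Int → List Int
  | _, [] => []
  | vis, d :: ds => if d ∈ vis then pvDiscover vis ds else d :: pvDiscover (vis ++ [d]) ds

lemma pvDiscover_measure (dict : List (Int × List Int)) :
    ∀ (ds vis : List Int), (∀ d ∈ ds, d ∈ pvUniv dict) →
      pvUnvis dict (vis ++ pvDiscover vis ds) + (pvDiscover vis ds).length ≤ pvUnvis dict vis := by
  intro ds
  induction ds with
  | nil => intro vis _; simp [pvDiscover]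
  | cons d ds ih =>
    intro vis hsub
    have hsub' : ∀ x ∈ ds, x ∈ pvUniv dict := fun x hx => hsub x (List.mem_cons_of_mem _ hx)
    by_cases hd : d ∈ vis
    · simpa [pvDiscover, hd] using ih vis hsub'
    · have hlt := pvUnvis_lt dict vis d (hsub d List.mem_cons_self) hd
      have hih := ih (vis ++ [d]) hsub'
      rw [List.append_assoc] at hih
      simp only [pvDiscover, if_neg hd, List.length_cons, List.cons_append]
      rw [show vis ++ d :: pvDiscover (vis ++ [d]) ds = vis ++ ([d] ++ pvDiscover (vis ++ [d]) ds) from by simp]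
      omega

lemma pvGet?_sub (dict : List (Int × List Int)) (n : Int) (deps : List Int)
    (h : PySem.Dict.get? (PySem.Dict.mk dict) n = some deps) : ∀ d ∈ deps, d ∈ pvUniv dict := by
  intro d hd
  rw [PySem.Dict.get?] at h
  obtain ⟨pr, hfind, hsnd⟩ := Option.map_eq_some_iff.mp h
  have hmem : pr ∈ dict := List.mem_of_find?_eq_some hfind
  unfold pvUniv
  rw [List.mem_dedup]
  exact List.mem_flatMap.mpr ⟨pr, hmem, by rw [hsnd]; exact hd⟩

lemma pvGetD_sub (dict : List (Int × List Int)) (n : Int) :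
    ∀ d ∈ PySem.Dict.getD (PySem.Dict.mk dict) n [], d ∈ pvUniv dict := by
  intro d hd
  rw [PySem.Dict.getD] at hd
  cases h : PySem.Dict.get? (PySem.Dict.mk dict) n with
  | none => rw [h] at hd; simp at hd
  | some deps => rw [h] at hd; exact pvGet?_sub dict n deps h d hd

-- the inner 'for CFGLineDepdcyLine in list(CFGLineDepdcyLineSet)' loop of A:
-- state (visited, controlFlowEdges, appended-to-queue)
def pvInnerA (fro : Int) : List Int → List Int → List String → List Int → List Int × List String × List Int
  | [], vis, edges, app => (vis, edges, app)
  | d :: ds, vis, edges, app =>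
    let cfEdge := PySem.Int.toStr d ++ "-" ++ PySem.Int.toStr fro
    let edges' := if cfEdge ∈ edges then edges else PySem.Set.add edges cfEdge
    if d ∈ vis then pvInnerA fro ds vis edges' app
    else pvInnerA fro ds (PySem.Set.add vis d) edges' (app ++ [d])

lemma pvInnerA_vis (fro : Int) (ds : List Int) :
    ∀ (vis : List Int) (edges : List String) (app : List Int),
      (pvInnerA fro ds vis edges app).1 = vis ++ pvDiscover vis ds := by
  induction ds with
  | nil => intro vis edges app; simp [pvInnerA, pvDiscover]
  | cons d ds ih =>
    intro vis edges app
    by_cases hd : d ∈ vis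
    · simp only [pvInnerA, pvDiscover, if_pos hd]
      simpa using ih vis _ app
    · simp only [pvInnerA, pvDiscover, if_neg hd]
      rw [ih _ _ _, pvAdd_not_mem hd]
      simp

lemma pvInnerA_app (fro : Int) (ds : List Int) :
    ∀ (vis : List Int) (edges : List String) (app : List Int),
      (pvInnerA fro ds vis edges app).2.2 = app ++ pvDiscover vis ds := by
  induction ds with
  | nil => intro vis edges app; simp [pvInnerA, pvDiscover]
  | cons d ds ih =>
    intro vis edges app
    by_cases hd : d ∈ vis
    · simp only [pvInnerA, pvDiscover, if_pos hd]
      simpa using ih vis _ app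
    · simp only [pvInnerA, pvDiscover, if_neg hd]
      rw [ih _ _ _, pvAdd_not_mem hd]
      simp

lemma pvInnerA_measure (dict : List (Int × List Int)) (fro : Int)
    (ds vis : List Int) (edges : List String)
    (hsub : ∀ d ∈ ds, d ∈ pvUniv dict) :
    pvUnvis dict (pvInnerA fro ds vis edges []).1 + ((pvInnerA fro ds vis edges []).2.2).length
      ≤ pvUnvis dict vis := by
  rw [pvInnerA_vis, pvInnerA_app]
  simpa using pvDiscover_measure dict ds vis hsub

-- the 'while queue:' loop of A: state (queue, visited, CFGDepdcyLines, relatedLines_final, controlFlowEdges)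
def pvGoA (dict : List (Int × List Int)) : List Int → List Int → List Int → List Int → List String → List Int
  | [], _, out, _, _ => out
  | fro :: rest, vis, out, rel, edges =>
    let p := if fro ∈ rel then (out, rel) else (PySem.Set.add out fro, PySem.Set.add rel fro)
    match h : PySem.Dict.get? (PySem.Dict.mk dict) fro with
    | none => pvGoA dict rest vis p.1 p.2 edges
    | some deps =>
      pvGoA dict (rest ++ (pvInnerA fro deps vis edges []).2.2)
        (pvInnerA fro deps vis edges []).1 p.1 p.2 (pvInnerA fro deps vis edges []).2.1
termination_by q vis _ _ _ => pvUnvis dict vis + q.length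
decreasing_by
  · simp only [List.length_cons]; omega
  · have hm := pvInnerA_measure dict fro deps vis edges (pvGet?_sub dict fro deps h)
    simp only [List.length_append, List.length_cons]
    omega

def getCFGDependencyEdgeLines (backWardRelatedLines : List Int) (CFGLineDepdcy : List (Int × List Int)) (relatedLines_final : List Int) (controlFlowEdges : List String) : List Int :=
  let queue : List Int := [] ++ backWardRelatedLines
  let visited : PySem.Set Int := PySem.Set.union PySem.Set.empty backWardRelatedLines
  pvGoA CFGLineDepdcy queue visited PySem.Set.empty relatedLines_final controlFlowEdges

-- ===== PORT B =====
-- proof/measure device used by the termination arguments of both ports' loops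
def pvDepsOf (dict : List (Int × List Int)) (n : Int) : List Int :=
  PySem.Dict.getD (PySem.Dict.mk dict) n []

def pvDiscAll (dict : List (Int × List Int)) : List Int → List Int → List Int
  | _, [] => []
  | vis, n :: q =>
    pvDiscover vis (pvDepsOf dict n) ++ pvDiscAll dict (vis ++ pvDiscover vis (pvDepsOf dict n)) q

-- 'for d in CFGLineDepdcy.get(n, []): if d not in seen: …' : state (seen, order, changed)
def pvScanB : List Int → List Int → List Int → Bool → List Int × List Int × Bool
  | [], seen, order, ch => (seen, order, ch)
  | d :: ds, seen, order, ch =>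
    if d ∈ seen then pvScanB ds seen order ch
    else pvScanB ds (PySem.Set.add seen d) (order ++ [d]) true

-- 'for n in list(order): …' (one full sweep over the snapshot)
def pvSweepB (dict : List (Int × List Int)) : List Int → List Int → List Int → Bool → List Int × List Int × Bool
  | [], seen, order, ch => (seen, order, ch)
  | n :: ns, seen, order, ch =>
    pvSweepB dict ns (pvScanB (PySem.Dict.getD (PySem.Dict.mk dict) n []) seen order ch).1
      (pvScanB (PySem.Dict.getD (PySem.Dict.mk dict) n []) seen order ch).2.1
      (pvScanB (PySem.Dict.getD (PySem.Dict.mk dict) n []) seen order ch).2.2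

lemma pvScanB_spec (ds : List Int) :
    ∀ (seen order : List Int) (ch : Bool),
      pvScanB ds seen order ch
        = (seen ++ pvDiscover seen ds, order ++ pvDiscover seen ds, ch || !(pvDiscover seen ds).isEmpty) := by
  induction ds with
  | nil => intro seen order ch; simp [pvScanB, pvDiscover]
  | cons d ds ih =>
    intro seen order ch
    by_cases hd : d ∈ seen
    · simp only [pvScanB, pvDiscover, if_pos hd]
      simpa using ih seen order ch
    · simp only [pvScanB, pvDiscover, if_neg hd]
      rw [ih _ _ _, pvAdd_not_mem hd]
      simp

lemma pvNotEmpty_append (a b : List Int) : (!(a ++ b).isEmpty) = (!a.isEmpty || !b.isEmpty) := by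
  cases a <;> simp

lemma pvSweepB_spec (dict : List (Int × List Int)) (snap : List Int) :
    ∀ (seen order : List Int) (ch : Bool),
      pvSweepB dict snap seen order ch
        = (seen ++ pvDiscAll dict seen snap, order ++ pvDiscAll dict seen snap,
           ch || !(pvDiscAll dict seen snap).isEmpty) := by
  induction snap with
  | nil => intro seen order ch; simp [pvSweepB, pvDiscAll]
  | cons n ns ih =>
    intro seen order ch
    simp only [pvSweepB, pvScanB_spec]
    rw [ih]
    simp [pvDiscAll, pvDepsOf, Bool.or_assoc, pvNotEmpty_append]

lemma pvDiscAll_measure (dict : List (Int × List Int)) (q : List Int) :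
    ∀ (vis : List Int),
      pvUnvis dict (vis ++ pvDiscAll dict vis q) + (pvDiscAll dict vis q).length ≤ pvUnvis dict vis := by
  induction q with
  | nil => intro vis; simp [pvDiscAll]
  | cons n q ih =>
    intro vis
    have h1 := pvDiscover_measure dict (pvDepsOf dict n) vis (by intro d hd; exact pvGetD_sub dict n d hd)
    have h2 := ih (vis ++ pvDiscover vis (pvDepsOf dict n))
    simp only [pvDiscAll, List.length_append]
    rw [← List.append_assoc]
    omega

-- the 'while changed:' loop of B: each round sweeps the current order snapshot
def pvFixB (dict : List (Int × List Int)) (seen order : List Int) : List Int :=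
  if h : (pvSweepB dict order seen order false).2.2 = true then
    pvFixB dict (pvSweepB dict order seen order false).1 (pvSweepB dict order seen order false).2.1
  else (pvSweepB dict order seen order false).2.1
termination_by pvUnvis dict seen
decreasing_by
  rw [pvSweepB_spec] at h ⊢
  simp only [Bool.false_or, Bool.not_eq_eq_eq_not, Bool.not_false, List.isEmpty_eq_false_iff] at h
  have hm := pvDiscAll_measure dict order seen
  have hl : (pvDiscAll dict seen order).length ≠ 0 := by simpa using h
  simp only []
  omega

def getCFGDependencyEdgeLines_alt (backWardRelatedLines : List Int) (CFGLineDepdcy : List (Int × List Int)) (relatedLines_final : List Int) (controlFlowEdges : List String) : List Int :=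
  let seen : PySem.Set Int := PySem.Set.ofList backWardRelatedLines
  let order : List Int := PySem.List.dedup backWardRelatedLines
  PySem.Set.ofList ((pvFixB CFGLineDepdcy seen order).filter (fun n => decide (n ∉ relatedLines_final)))

-- ===== PRECONDITION & SPEC =====
def Spec_getCFGDependencyEdgeLines (backWardRelatedLines : List Int) (CFGLineDepdcy : List (Int × List Int)) (relatedLines_final : List Int) (controlFlowEdges : List String) (out : List Int) : Prop := out = getCFGDependencyEdgeLines_alt backWardRelatedLines CFGLineDepdcy relatedLines_final controlFlowEdges
instance (backWardRelatedLines : List Int) (CFGLineDepdcy : List (Int × List Int)) (relatedLines_final : List Int) (controlFlowEdges : List String) (out : List Int) : Decidable (Spec_getCFGDependencyEdgeLines backWardRelatedLines CFGLineDepdcy relatedLines_final controlFlowEdges out) := by unfold Spec_getCFGDependencyEdgeLines; infer_instance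

-- ===== CLAIM (what is proved, stated in full; the proofs are below) =====
def Claim_equal_getCFGDependencyEdgeLines : Prop := ∀ (backWardRelatedLines : List Int) (CFGLineDepdcy : List (Int × List Int)) (relatedLines_final : List Int) (controlFlowEdges : List String), Dom_getCFGDependencyEdgeLines backWardRelatedLines CFGLineDepdcy relatedLines_final controlFlowEdges → Spec_getCFGDependencyEdgeLines backWardRelatedLines CFGLineDepdcy relatedLines_final controlFlowEdges (getCFGDependencyEdgeLines backWardRelatedLines CFGLineDepdcy relatedLines_final controlFlowEdges)

-- ===== LEMMAS AND PROOFS =====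

lemma pvAdd_mem {x : Int} {s : List Int} (h : x ∈ s) : PySem.Set.add s x = s := by
  simp [PySem.Set.add, PySem.Set.contains, h]

lemma pvDiscover_mem {vis ds : List Int} {x : Int} (h : x ∈ pvDiscover vis ds) : x ∈ ds ∧ x ∉ vis := by
  induction ds generalizing vis with
  | nil => simp [pvDiscover] at h
  | cons d ds ih =>
    by_cases hd : d ∈ vis
    · simp only [pvDiscover, if_pos hd] at h
      have := ih h; exact ⟨List.mem_cons_of_mem _ this.1, this.2⟩
    · simp only [pvDiscover, if_neg hd] at h
      rcases List.mem_cons.mp h with rfl | h2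
      · exact ⟨List.mem_cons_self, hd⟩
      · have := ih h2
        refine ⟨List.mem_cons_of_mem _ this.1, fun hx => this.2 (by simp [hx])⟩

lemma pvDiscover_nodup (vis ds : List Int) : (pvDiscover vis ds).Nodup := by
  induction ds generalizing vis with
  | nil => simp [pvDiscover]
  | cons d ds ih =>
    by_cases hd : d ∈ vis
    · simpa [pvDiscover, hd] using ih vis
    · simp only [pvDiscover, if_neg hd, List.nodup_cons]
      refine ⟨fun hmem => ?_, ih (vis ++ [d])⟩
      have := (pvDiscover_mem hmem).2
      simp at this

lemma pvDiscover_congr {v1 v2 : List Int} (ds : List Int) (h : ∀ a ∈ ds, (a ∈ v1 ↔ a ∈ v2)) :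
    pvDiscover v1 ds = pvDiscover v2 ds := by
  induction ds generalizing v1 v2 with
  | nil => simp [pvDiscover]
  | cons d ds ih =>
    have hd := h d List.mem_cons_self
    by_cases h1 : d ∈ v1
    · simp only [pvDiscover, if_pos h1, if_pos (hd.mp h1)]
      exact ih (fun a ha => h a (List.mem_cons_of_mem _ ha))
    · have h2 : d ∉ v2 := fun hx => h1 (hd.mpr hx)
      simp only [pvDiscover, if_neg h1, if_neg h2]
      congr 1
      exact ih (fun a ha => by
        have := h a (List.mem_cons_of_mem _ ha); simp [this])

lemma pvDiscover_filter {ds : List Int} (h : ds.Nodup) (vis : List Int) :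
    pvDiscover vis ds = ds.filter (fun a => decide (a ∉ vis)) := by
  induction ds generalizing vis with
  | nil => simp [pvDiscover]
  | cons d ds ih =>
    rcases List.nodup_cons.mp h with ⟨hd, hds⟩
    by_cases hv : d ∈ vis
    · simp only [pvDiscover, if_pos hv, List.filter_cons]
      rw [if_neg (by simp [hv])]
      exact ih hds vis
    · simp only [pvDiscover, if_neg hv, List.filter_cons]
      rw [if_pos (by simp [hv])]
      congr 1
      rw [pvDiscover_congr ds (fun a ha => by
        constructor
        · intro hx; simp at hx
          rcases hx with hx | hx
          · exact hx
          · exact absurd (hx ▸ ha) hd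
        · intro hx; simp [hx])]
      exact ih hds vis

lemma pvFoldlAdd (l s : List Int) : l.foldl PySem.Set.add s = s ++ pvDiscover s l := by
  induction l generalizing s with
  | nil => simp [pvDiscover]
  | cons x t ih =>
    by_cases hx : x ∈ s
    · simp only [List.foldl_cons, pvAdd_mem hx, pvDiscover, if_pos hx]
      exact ih s
    · simp only [List.foldl_cons, pvAdd_not_mem hx, pvDiscover, if_neg hx]
      rw [ih (s ++ [x])]
      simp

lemma pvOfList_eq (l : List Int) : PySem.Set.ofList l = pvDiscover [] l := by
  have := pvFoldlAdd l []
  simpa [PySem.Set.ofList, PySem.Set.empty] using this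

lemma pvDiscover_ofList_filter (rel l : List Int) :
    pvDiscover rel l = (PySem.Set.ofList l).filter (fun a => decide (a ∉ rel)) := by
  rw [pvOfList_eq]
  suffices h : ∀ (l rel acc : List Int), (∀ a ∈ acc, a ∈ rel) →
      pvDiscover rel l = (pvDiscover acc l).filter (fun a => decide (a ∉ rel)) by
    exact h l rel [] (by simp)
  clear rel l
  intro l
  induction l with
  | nil => intro rel acc _; simp [pvDiscover]
  | cons x t ih =>
    intro rel acc hsub
    by_cases hacc : x ∈ acc
    · have hrel : x ∈ rel := hsub x hacc
      simp only [pvDiscover, if_pos hacc, if_pos hrel]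
      exact ih rel acc hsub
    · by_cases hrel : x ∈ rel
      · simp only [pvDiscover, if_pos hrel, if_neg hacc, List.filter_cons]
        rw [if_neg (by simp [hrel])]
        exact ih rel (acc ++ [x]) (by
          intro a ha
          rcases List.mem_append.mp ha with ha | ha
          · exact hsub a ha
          · simp at ha; subst ha; exact hrel)
      · simp only [pvDiscover, if_neg hrel, if_neg hacc, List.filter_cons]
        rw [if_pos (by simp [hrel])]
        congr 1
        rw [ih (rel ++ [x]) (acc ++ [x]) (by
          intro a ha
          rcases List.mem_append.mp ha with ha | ha
          · exact List.mem_append.mpr (Or.inl (hsub a ha))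
          · exact List.mem_append.mpr (Or.inr ha))]
        apply List.filter_congr
        intro a ha
        have hnm := (pvDiscover_mem ha).2
        have hax : a ≠ x := fun he => hnm (by simp [he])
        simp [hax]

lemma pvOfList_nodup_self {l : List Int} (h : l.Nodup) : PySem.Set.ofList l = l := by
  rw [pvOfList_eq, pvDiscover_filter h]
  simp

lemma pvDiscAll_not_mem (dict : List (Int × List Int)) (q : List Int) :
    ∀ (vis : List Int) (x : Int), x ∈ pvDiscAll dict vis q → x ∉ vis := by
  induction q with
  | nil => intro vis x h; simp [pvDiscAll] at h
  | cons n q ih =>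
    intro vis x h
    simp only [pvDiscAll, List.mem_append] at h
    rcases h with h | h
    · exact (pvDiscover_mem h).2
    · intro hx
      exact ih _ x h (by simp [hx])

lemma pvDiscAll_nodup (dict : List (Int × List Int)) (q : List Int) :
    ∀ (vis : List Int), (pvDiscAll dict vis q).Nodup := by
  induction q with
  | nil => intro vis; simp [pvDiscAll]
  | cons n q ih =>
    intro vis
    simp only [pvDiscAll]
    rw [List.nodup_append]
    refine ⟨pvDiscover_nodup _ _, ih _, ?_⟩
    intro x hx y hy heq
    exact (pvDiscAll_not_mem dict q (vis ++ pvDiscover vis (pvDepsOf dict n)) y hy)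
      (List.mem_append.mpr (Or.inr (heq ▸ hx)))

-- the visit sequence of A's queue (one node at a time), and related basics
def pvVisits (dict : List (Int × List Int)) (q vis : List Int) : List Int :=
  match q with
  | [] => []
  | n :: rest =>
    n :: pvVisits dict (rest ++ pvDiscover vis (pvDepsOf dict n)) (vis ++ pvDiscover vis (pvDepsOf dict n))
termination_by pvUnvis dict vis + q.length
decreasing_by
  have hm := pvDiscover_measure dict (pvDepsOf dict n) vis (by intro d hd; exact pvGetD_sub dict n d hd)
  simp only [List.length_append, List.length_cons]
  omega

lemma pvMem_self_discover (ds : List Int) : ∀ (vis : List Int) (d : Int), d ∈ ds → d ∈ vis ++ pvDiscover vis ds := by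
  induction ds with
  | nil => intro vis d h; simp at h
  | cons x t ih =>
    intro vis d h
    by_cases hx : x ∈ vis
    · simp only [pvDiscover, if_pos hx]
      rcases List.mem_cons.mp h with rfl | h2
      · exact List.mem_append.mpr (Or.inl hx)
      · exact ih vis d h2
    · simp only [pvDiscover, if_neg hx]
      rcases List.mem_cons.mp h with rfl | h2
      · simp
      · have := ih (vis ++ [x]) d h2
        simp [List.mem_append, List.mem_cons] at this ⊢
        tauto

lemma pvDiscover_nil_of_subset {ds vis : List Int} (h : ∀ d ∈ ds, d ∈ vis) :
    pvDiscover vis ds = [] := by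
  induction ds with
  | nil => simp [pvDiscover]
  | cons d t ih =>
    have hd : d ∈ vis := h d List.mem_cons_self
    simp only [pvDiscover, if_pos hd]
    exact ih (fun x hx => h x (List.mem_cons_of_mem _ hx))

lemma pvDiscAll_nil_of_subset (dict : List (Int × List Int)) {q vis : List Int}
    (h : ∀ n ∈ q, ∀ d ∈ pvDepsOf dict n, d ∈ vis) : pvDiscAll dict vis q = [] := by
  induction q with
  | nil => simp [pvDiscAll]
  | cons n t ih =>
    have hn : pvDiscover vis (pvDepsOf dict n) = [] :=
      pvDiscover_nil_of_subset (h n List.mem_cons_self)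
    simp only [pvDiscAll, hn, List.nil_append, List.append_nil]
    exact ih (fun m hm => h m (List.mem_cons_of_mem _ hm))

lemma pvDiscAll_append (dict : List (Int × List Int)) (q1 : List Int) :
    ∀ (q2 vis : List Int),
      pvDiscAll dict vis (q1 ++ q2)
        = pvDiscAll dict vis q1 ++ pvDiscAll dict (vis ++ pvDiscAll dict vis q1) q2 := by
  induction q1 with
  | nil => intro q2 vis; simp [pvDiscAll]
  | cons n t ih =>
    intro q2 vis
    simp only [List.cons_append, pvDiscAll]
    rw [ih]
    simp [List.append_assoc]

lemma pvDiscAll_covers (dict : List (Int × List Int)) (fr : List Int) :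
    ∀ (vis : List Int) (n : Int), n ∈ fr → ∀ d ∈ pvDepsOf dict n, d ∈ vis ++ pvDiscAll dict vis fr := by
  induction fr with
  | nil => intro vis n h; simp at h
  | cons m t ih =>
    intro vis n hn d hd
    rcases List.mem_cons.mp hn with rfl | hn2
    · have := pvMem_self_discover (pvDepsOf dict n) vis d hd
      simp only [pvDiscAll, List.mem_append] at this ⊢
      tauto
    · have := ih (vis ++ pvDiscover vis (pvDepsOf dict m)) n hn2 d hd
      simp only [pvDiscAll, List.mem_append] at this ⊢
      tauto

lemma pvDiscAll_of_discover (dict : List (Int × List Int)) (q : List Int) :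
    ∀ (t vis : List Int), (∀ n ∈ t, ∀ d ∈ pvDepsOf dict n, d ∈ vis) →
      pvDiscAll dict vis (pvDiscover t q) = pvDiscAll dict vis q := by
  induction q with
  | nil => intro t vis _; simp [pvDiscover]
  | cons n q ih =>
    intro t vis ht
    by_cases hn : n ∈ t
    · simp only [pvDiscover, if_pos hn]
      rw [ih t vis ht]
      have hdep : pvDiscover vis (pvDepsOf dict n) = [] :=
        pvDiscover_nil_of_subset (ht n hn)
      simp [pvDiscAll, hdep]
    · simp only [pvDiscover, if_neg hn, pvDiscAll]
      congr 1
      apply ih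
      intro m hm d hd
      rcases List.mem_append.mp hm with hm | hm
      · exact List.mem_append.mpr (Or.inl (ht m hm d hd))
      · simp at hm; subst hm
        exact pvMem_self_discover _ vis d hd

-- one pass of A's loop over a whole level: (new-queue-suffix, visited, out, related, edges)
def pvLevelA (dict : List (Int × List Int)) : List Int → List Int → List Int → List Int → List String → List Int × List Int × List Int × List Int × List String
  | [], vis, out, rel, edges => ([], vis, out, rel, edges)
  | fro :: rest, vis, out, rel, edges =>
    let p := if fro ∈ rel then (out, rel) else (PySem.Set.add out fro, PySem.Set.add rel fro)
    match PySem.Dict.get? (PySem.Dict.mk dict) fro with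
    | none => pvLevelA dict rest vis p.1 p.2 edges
    | some deps =>
      ((pvInnerA fro deps vis edges []).2.2 ++ (pvLevelA dict rest (pvInnerA fro deps vis edges []).1 p.1 p.2 (pvInnerA fro deps vis edges []).2.1).1,
       (pvLevelA dict rest (pvInnerA fro deps vis edges []).1 p.1 p.2 (pvInnerA fro deps vis edges []).2.1).2)

lemma pvGoA_levelA (dict : List (Int × List Int)) (q : List Int) :
    ∀ (extra vis out rel : List Int) (edges : List String),
      pvGoA dict (q ++ extra) vis out rel edges
        = pvGoA dict (extra ++ (pvLevelA dict q vis out rel edges).1)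
            (pvLevelA dict q vis out rel edges).2.1
            (pvLevelA dict q vis out rel edges).2.2.1
            (pvLevelA dict q vis out rel edges).2.2.2.1
            (pvLevelA dict q vis out rel edges).2.2.2.2 := by
  induction q with
  | nil => intro extra vis out rel edges; simp [pvLevelA]
  | cons fro rest ih =>
    intro extra vis out rel edges
    rw [List.cons_append, pvGoA]
    split
    next h =>
      simp only [pvLevelA, h]
      exact ih extra vis _ _ edges
    next deps h =>
      simp only [pvLevelA, h]
      rw [List.append_assoc]
      rw [ih (extra ++ (pvInnerA fro deps vis edges []).2.2) _ _ _ _]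
      simp [List.append_assoc]

lemma pvLevelA_spec (dict : List (Int × List Int)) (q : List Int) :
    ∀ (vis out rel : List Int) (edges : List String), (∀ a ∈ out, a ∈ rel) →
      (pvLevelA dict q vis out rel edges).1 = pvDiscAll dict vis q
      ∧ (pvLevelA dict q vis out rel edges).2.1 = vis ++ pvDiscAll dict vis q
      ∧ (pvLevelA dict q vis out rel edges).2.2.1 = out ++ pvDiscover rel q
      ∧ (pvLevelA dict q vis out rel edges).2.2.2.1 = rel ++ pvDiscover rel q := by
  induction q with
  | nil => intro vis out rel edges _; simp [pvLevelA, pvDiscAll, pvDiscover]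
  | cons fro rest ih =>
    intro vis out rel edges hsub
    by_cases hrel : fro ∈ rel
    · have hp : (if fro ∈ rel then (out, rel) else (PySem.Set.add out fro, PySem.Set.add rel fro)) = (out, rel) := if_pos hrel
      cases h : PySem.Dict.get? (PySem.Dict.mk dict) fro with
      | none =>
        have hdeps : pvDepsOf dict fro = [] := by simp [pvDepsOf, PySem.Dict.getD, h]
        obtain ⟨i1, i2, i3, i4⟩ := ih vis out rel edges hsub
        simp only [pvLevelA, h, hp]
        simp only [pvDiscAll, hdeps, pvDiscover, if_pos hrel, List.nil_append, List.append_nil]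
        exact ⟨i1, i2, i3, i4⟩
      | some deps =>
        have hdeps : pvDepsOf dict fro = deps := by simp [pvDepsOf, PySem.Dict.getD, h]
        have hiv := pvInnerA_vis fro deps vis edges []
        have hia := pvInnerA_app fro deps vis edges []
        obtain ⟨i1, i2, i3, i4⟩ := ih (pvInnerA fro deps vis edges []).1 out rel (pvInnerA fro deps vis edges []).2.1 hsub
        simp only [pvLevelA, h, hp]
        simp only [pvDiscAll, hdeps, pvDiscover, if_pos hrel]
        refine ⟨?_, ?_, i3, i4⟩
        · rw [hia, i1, hiv]; simp
        · rw [i2, hiv]; simp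
    · have hp : (if fro ∈ rel then (out, rel) else (PySem.Set.add out fro, PySem.Set.add rel fro)) = (out ++ [fro], rel ++ [fro]) := by
        rw [if_neg hrel]
        have hout : fro ∉ out := fun hx => hrel (hsub fro hx)
        rw [pvAdd_not_mem hout, pvAdd_not_mem hrel]
      have hsub' : ∀ a ∈ out ++ [fro], a ∈ rel ++ [fro] := by
        intro a ha
        rcases List.mem_append.mp ha with ha | ha
        · exact List.mem_append.mpr (Or.inl (hsub a ha))
        · exact List.mem_append.mpr (Or.inr ha)
      cases h : PySem.Dict.get? (PySem.Dict.mk dict) fro with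
      | none =>
        have hdeps : pvDepsOf dict fro = [] := by simp [pvDepsOf, PySem.Dict.getD, h]
        obtain ⟨i1, i2, i3, i4⟩ := ih vis (out ++ [fro]) (rel ++ [fro]) edges hsub'
        simp only [pvLevelA, h, hp]
        simp only [pvDiscAll, hdeps, pvDiscover, if_neg hrel, List.nil_append, List.append_nil]
        refine ⟨i1, i2, ?_, ?_⟩
        · rw [i3]; simp
        · rw [i4]; simp
      | some deps =>
        have hdeps : pvDepsOf dict fro = deps := by simp [pvDepsOf, PySem.Dict.getD, h]
        have hiv := pvInnerA_vis fro deps vis edges []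
        have hia := pvInnerA_app fro deps vis edges []
        obtain ⟨i1, i2, i3, i4⟩ := ih (pvInnerA fro deps vis edges []).1 (out ++ [fro]) (rel ++ [fro]) (pvInnerA fro deps vis edges []).2.1 hsub'
        simp only [pvLevelA, h, hp]
        simp only [pvDiscAll, hdeps, pvDiscover, if_neg hrel]
        refine ⟨?_, ?_, ?_, ?_⟩
        · rw [hia, i1, hiv]; simp
        · rw [i2, hiv]; simp
        · rw [i3]; simp
        · rw [i4]; simp

lemma pvLevelMeasure (dict : List (Int × List Int)) (fr vis : List Int) (hne : fr ≠ []) :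
    pvUnvis dict (vis ++ pvDiscAll dict vis fr) + (pvDiscAll dict vis fr).length
      < pvUnvis dict vis + fr.length := by
  have hm := pvDiscAll_measure dict fr vis
  have hl : fr.length ≠ 0 := by simpa using hne
  omega

-- BFS visit order from a frontier (current frontier included)
def pvBfsOrd (dict : List (Int × List Int)) (fr vis : List Int) : List Int :=
  if h : fr = [] then []
  else fr ++ pvBfsOrd dict (pvDiscAll dict vis fr) (vis ++ pvDiscAll dict vis fr)
termination_by pvUnvis dict vis + fr.length
decreasing_by exact pvLevelMeasure dict fr vis h

theorem pvBfsOrd_inv (dict : List (Int × List Int)) (fr vis : List Int)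
    (h1 : fr.Nodup) (h2 : ∀ a ∈ fr, a ∈ vis) :
    (pvBfsOrd dict fr vis).Nodup ∧ ∀ a ∈ pvBfsOrd dict fr vis, a ∈ fr ∨ a ∉ vis := by
  by_cases h : fr = []
  · subst h; rw [pvBfsOrd]; simp
  · rw [pvBfsOrd, dif_neg h]
    have hN := pvDiscAll_nodup dict fr vis
    have hn2 : ∀ a ∈ pvDiscAll dict vis fr, a ∈ vis ++ pvDiscAll dict vis fr := by
      intro a ha; exact List.mem_append.mpr (Or.inr ha)
    have ihp := pvBfsOrd_inv dict (pvDiscAll dict vis fr) (vis ++ pvDiscAll dict vis fr) hN hn2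
    constructor
    · rw [List.nodup_append]
      refine ⟨h1, ihp.1, ?_⟩
      intro x hx y hy heq
      subst heq
      rcases ihp.2 x hy with hm | hm
      · exact (pvDiscAll_not_mem dict fr vis x hm) (h2 x hx)
      · exact hm (List.mem_append.mpr (Or.inl (h2 x hx)))
    · intro a ha
      rcases List.mem_append.mp ha with ha | ha
      · exact Or.inl ha
      · rcases ihp.2 a ha with hm | hm
        · exact Or.inr (pvDiscAll_not_mem dict fr vis a hm)
        · exact Or.inr (fun hx => hm (List.mem_append.mpr (Or.inl hx)))
termination_by pvUnvis dict vis + fr.length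
decreasing_by exact pvLevelMeasure dict fr vis h

theorem pvMain (dict : List (Int × List Int)) (fr vis out rel0 : List Int) (edges : List String)
    (h1 : fr.Nodup) (h2 : ∀ a ∈ fr, a ∈ vis) (h3 : ∀ a ∈ out, a ∈ vis) (h4 : ∀ a ∈ fr, a ∉ out) :
    pvGoA dict fr vis out (rel0 ++ out) edges
      = out ++ (pvBfsOrd dict fr vis).filter (fun a => decide (a ∉ rel0)) := by
  by_cases h : fr = []
  · subst h; rw [pvBfsOrd]; simp [pvGoA]
  · have hsub : ∀ a ∈ out, a ∈ rel0 ++ out := by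
      intro a ha; exact List.mem_append.mpr (Or.inr ha)
    have hL := pvGoA_levelA dict fr [] vis out (rel0 ++ out) edges
    rw [List.append_nil, List.nil_append] at hL
    obtain ⟨s1, s2, s3, s4⟩ := pvLevelA_spec dict fr vis out (rel0 ++ out) edges hsub
    have hdis : pvDiscover (rel0 ++ out) fr = fr.filter (fun a => decide (a ∉ rel0)) := by
      rw [pvDiscover_filter h1]
      apply List.filter_congr
      intro a ha
      have := h4 a ha
      simp [this]
    have hout' : (pvLevelA dict fr vis out (rel0 ++ out) edges).2.2.1
        = out ++ fr.filter (fun a => decide (a ∉ rel0)) := by rw [s3, hdis]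
    have hrel' : (pvLevelA dict fr vis out (rel0 ++ out) edges).2.2.2.1
        = rel0 ++ (out ++ fr.filter (fun a => decide (a ∉ rel0))) := by
      rw [s4, hdis]; simp
    rw [hL, s1, s2, hout', hrel']
    have hrec := pvMain dict (pvDiscAll dict vis fr) (vis ++ pvDiscAll dict vis fr)
      (out ++ fr.filter (fun a => decide (a ∉ rel0))) rel0
      (pvLevelA dict fr vis out (rel0 ++ out) edges).2.2.2.2
      (pvDiscAll_nodup dict fr vis)
      (by intro a ha; exact List.mem_append.mpr (Or.inr ha))
      (by intro a ha
          rcases List.mem_append.mp ha with ha | ha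
          · exact List.mem_append.mpr (Or.inl (h3 a ha))
          · exact List.mem_append.mpr (Or.inl (h2 a (List.mem_of_mem_filter ha))))
      (by intro a ha
          have hnv := pvDiscAll_not_mem dict fr vis a ha
          intro hmem
          rcases List.mem_append.mp hmem with hm | hm
          · exact hnv (h3 a hm)
          · exact hnv (h2 a (List.mem_of_mem_filter hm)))
    rw [hrec]
    conv_rhs => rw [pvBfsOrd, dif_neg h]
    simp [List.filter_append, List.append_assoc]
termination_by pvUnvis dict vis + fr.length
decreasing_by exact pvLevelMeasure dict fr vis h

-- the fixpoint loop of B computes exactly the BFS order of the still-unswept suffix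
theorem pvFixB_spec (dict : List (Int × List Int)) (seen done fr : List Int)
    (hdone : ∀ n ∈ done, ∀ d ∈ pvDepsOf dict n, d ∈ seen) :
    pvFixB dict seen (done ++ fr) = done ++ pvBfsOrd dict fr seen := by
  have hE : pvDiscAll dict seen (done ++ fr) = pvDiscAll dict seen fr := by
    rw [pvDiscAll_append, pvDiscAll_nil_of_subset dict hdone]
    simp
  rw [pvFixB, pvSweepB_spec, hE]
  by_cases hEnil : pvDiscAll dict seen fr = []
  · rw [hEnil]
    rw [dif_neg (by simp)]
    simp only [List.append_nil]
    by_cases hfr : fr = []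
    · subst hfr; rw [pvBfsOrd]; simp
    · rw [pvBfsOrd, dif_neg hfr, hEnil]
      rw [show pvBfsOrd dict ([] : List Int) (seen ++ []) = [] from by rw [pvBfsOrd]; simp]
      simp
  · have hfr : fr ≠ [] := by
      intro hc; subst hc; simp [pvDiscAll] at hEnil
    rw [dif_pos (by simp [hEnil])]
    have hrec := pvFixB_spec dict (seen ++ pvDiscAll dict seen fr) (done ++ fr) (pvDiscAll dict seen fr)
      (by intro n hn d hd
          rcases List.mem_append.mp hn with hn | hn
          · exact List.mem_append.mpr (Or.inl (hdone n hn d hd))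
          · exact pvDiscAll_covers dict fr seen n hn d hd)
    dsimp only
    rw [hrec]
    conv_rhs => rw [pvBfsOrd]
    rw [dif_neg hfr]
    simp [List.append_assoc]
termination_by pvUnvis dict seen
decreasing_by
  have hm := pvDiscAll_measure dict fr seen
  have hl : (pvDiscAll dict seen fr).length ≠ 0 := by simpa using hEnil
  omega

-- ===== VERDICT (by name: the statement is the Claim_ definition above) =====
theorem getCFGDependencyEdgeLines_spec : Claim_equal_getCFGDependencyEdgeLines := by
  intro bw dict rel edges _
  unfold Spec_getCFGDependencyEdgeLines getCFGDependencyEdgeLines getCFGDependencyEdgeLines_alt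
  simp only [List.nil_append]
  have hvis0 : PySem.Set.union PySem.Set.empty bw = PySem.Set.ofList bw := rfl
  rw [hvis0]
  have hdedup : PySem.List.dedup bw = PySem.Set.ofList bw := by
    simp [PySem.List.dedup]
  rw [hdedup]
  by_cases hbw : bw = []
  · subst hbw
    rw [show PySem.Set.ofList ([] : List Int) = [] from rfl]
    rw [show pvFixB dict [] [] = [] from by rw [pvFixB]; simp [pvSweepB]]
    simp [pvGoA, PySem.Set.empty]
  · -- A side
    have hL := pvGoA_levelA dict bw [] (PySem.Set.ofList bw) PySem.Set.empty rel edges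
    rw [List.append_nil, List.nil_append] at hL
    obtain ⟨s1, s2, s3, s4⟩ := pvLevelA_spec dict bw (PySem.Set.ofList bw) PySem.Set.empty rel edges
      (by intro a ha; simp [PySem.Set.empty] at ha)
    have hout1 : (pvLevelA dict bw (PySem.Set.ofList bw) PySem.Set.empty rel edges).2.2.1
        = pvDiscover rel bw := by
      rw [s3]; simp [PySem.Set.empty]
    have hrel1 : (pvLevelA dict bw (PySem.Set.ofList bw) PySem.Set.empty rel edges).2.2.2.1
        = rel ++ pvDiscover rel bw := s4
    have hmain := pvMain dict (pvDiscAll dict (PySem.Set.ofList bw) bw)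
      (PySem.Set.ofList bw ++ pvDiscAll dict (PySem.Set.ofList bw) bw)
      (pvDiscover rel bw) rel
      (pvLevelA dict bw (PySem.Set.ofList bw) PySem.Set.empty rel edges).2.2.2.2
      (pvDiscAll_nodup dict bw _)
      (by intro a ha; exact List.mem_append.mpr (Or.inr ha))
      (by intro a ha
          have hm : a ∈ bw := (pvDiscover_mem ha).1
          exact List.mem_append.mpr (Or.inl ((PySem.Set.mem_ofList bw a).mpr hm)))
      (by intro a ha
          have hnv := pvDiscAll_not_mem dict bw (PySem.Set.ofList bw) a ha
          intro hmem
          have hm : a ∈ bw := (pvDiscover_mem hmem).1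
          exact hnv ((PySem.Set.mem_ofList bw a).mpr hm))
    rw [hL, s1, s2, hout1, hrel1, hmain]
    -- B side
    have hfix : pvFixB dict (PySem.Set.ofList bw) (PySem.Set.ofList bw)
        = pvBfsOrd dict (PySem.Set.ofList bw) (PySem.Set.ofList bw) := by
      have := pvFixB_spec dict (PySem.Set.ofList bw) [] (PySem.Set.ofList bw) (by simp)
      simpa using this
    have hne : PySem.Set.ofList bw ≠ [] := by
      intro hc
      rcases bw with _ | ⟨b, t⟩
      · exact hbw rfl
      · have : b ∈ PySem.Set.ofList (b :: t) := (PySem.Set.mem_ofList _ _).mpr List.mem_cons_self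
        rw [hc] at this; simp at this
    rw [hfix]
    conv_rhs => rw [pvBfsOrd]
    rw [dif_neg hne]
    have hDA : pvDiscAll dict (PySem.Set.ofList bw) (PySem.Set.ofList bw)
        = pvDiscAll dict (PySem.Set.ofList bw) bw := by
      exact (congrArg (pvDiscAll dict (PySem.Set.ofList bw)) (pvOfList_eq bw)).trans
        (pvDiscAll_of_discover dict bw [] (PySem.Set.ofList bw) (by simp))
    rw [hDA]
    have hout1f : pvDiscover rel bw = (PySem.Set.ofList bw).filter (fun a => decide (a ∉ rel)) :=
      pvDiscover_ofList_filter rel bw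
    have hinv := pvBfsOrd_inv dict (pvDiscAll dict (PySem.Set.ofList bw) bw)
      (PySem.Set.ofList bw ++ pvDiscAll dict (PySem.Set.ofList bw) bw)
      (pvDiscAll_nodup dict bw _) (by intro a ha; exact List.mem_append.mpr (Or.inr ha))
    have hnodfull : (PySem.Set.ofList bw ++ pvBfsOrd dict (pvDiscAll dict (PySem.Set.ofList bw) bw) (PySem.Set.ofList bw ++ pvDiscAll dict (PySem.Set.ofList bw) bw)).Nodup := by
      rw [List.nodup_append]
      refine ⟨PySem.Set.nodup_ofList bw, hinv.1, ?_⟩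
      intro x hx y hy heq
      subst heq
      rcases hinv.2 x hy with hm | hm
      · exact (pvDiscAll_not_mem dict bw _ x hm) hx
      · exact hm (List.mem_append.mpr (Or.inl hx))
    rw [pvOfList_nodup_self (hnodfull.filter _)]
    rw [List.filter_append, hout1f]
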